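-- pv_equiv track=rewrite | github.com/kole1337/codewars | immortal2.py | elder_age
-- ===== SOURCE A (Python) =====
-- def elder_age(m,y,l,t):
--     T = 0
--     while y:
--         y, Y, x = y & y-1, y, m
--         while x:
--             x, X = x & x-1, x
--             s, S = sorted((X - x, Y - y))
--             h = max((x^y | S-1) + 1 - l, 0)
--             w = min(h, S)
--             T += s * w * (h + h - w - 1) // 2
--     return T % t
-- ===== SOURCE B (Python) =====
-- def _series(p, off):
--     # sum over v in [0,p) of max(v - off, 0), p a power of two, closed form
--     c = min(max(off, 0), p)
--     return (p - c) * (p - 1 + c - 2 * off) // 2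
--
--
-- def _f(M, N, off):
--     # sum over i in [0,M), j in [0,N) of max((i ^ j) - off, 0)
--     if M <= 0 or N <= 0:
--         return 0
--     if M < N:
--         return _f(N, M, off)
--     p = 1 << (M.bit_length() - 1)  # p <= M < 2*p
--     if N <= p:
--         # i < p: each row's XOR values run over all of [0,p)
--         # i >= p: the high bit adds p to every XOR value
--         return N * _series(p, off) + _f(M - p, N, off - p)
--     # both sides straddle p: three full blocks plus one recursive corner
--     return (p * _series(p, off)
--             + (M - p + N - p) * _series(p, off - p)
--             + _f(M - p, N - p, off))
--
--
-- def elder_age(m, y, l, t):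
--     return _f(m, y, l) % t
-- ===== Notes on version B (the rewrite author's own statement) =====
-- stated objective: alternative
-- what changed: Replaced A's double loop over the set bits of y and m (one closed-form term per pair of bit-blocks) by a divide-and-conquer recursion on the grid that splits at the largest power of two below max(m,y) and sums full power-of-two blocks in closed form.
-- outside the precondition, e.g. on elder_age(5, -3, 0, 7): A does not finish within the time limit, B returns 0; on elder_age(3, 2, 0, 0): A raises ZeroDivisionError, B raises ZeroDivisionError
import Mathlib
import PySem

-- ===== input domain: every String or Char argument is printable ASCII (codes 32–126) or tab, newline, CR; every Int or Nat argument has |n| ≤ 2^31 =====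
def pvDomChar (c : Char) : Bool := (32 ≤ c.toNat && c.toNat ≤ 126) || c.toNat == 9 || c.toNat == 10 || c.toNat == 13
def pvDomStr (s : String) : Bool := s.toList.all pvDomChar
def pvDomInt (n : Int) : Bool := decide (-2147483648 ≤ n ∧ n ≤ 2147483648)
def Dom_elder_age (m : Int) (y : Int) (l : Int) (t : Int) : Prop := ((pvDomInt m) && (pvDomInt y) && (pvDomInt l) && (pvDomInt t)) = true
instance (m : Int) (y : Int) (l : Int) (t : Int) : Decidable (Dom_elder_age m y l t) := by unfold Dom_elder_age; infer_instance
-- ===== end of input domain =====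

-- B replaces A's loop over pairs of set bits of y and m by a divide-and-conquer
-- recursion splitting the grid at the largest power of two (objective: alternative).

-- ===== PORT A =====
-- A's inner while-loop over x; the loop state y (stripped), Y and the accumulator T
-- are explicit parameters.  Python's `sorted` on the 2-tuple is ported as min/max.
def innerA (ynew Y : Nat) (l : Int) (x : Nat) (T : Int) : Int :=
  if _hx : x = 0 then T
  else
    let x2 := x &&& (x - 1)
    let s : Int := min ((x : Int) - (x2 : Int)) ((Y : Int) - (ynew : Int))
    let S : Int := max ((x : Int) - (x2 : Int)) ((Y : Int) - (ynew : Int))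
    let h : Int := max (PySem.Int.bor ((x2 ^^^ ynew : Nat) : Int) (S - 1) + 1 - l) 0
    let w : Int := min h S
    innerA ynew Y l x2 (T + PySem.Int.floordiv (s * w * (h + h - w - 1)) 2)
  termination_by x
  decreasing_by exact Nat.lt_of_le_of_lt Nat.and_le_right (by omega)

-- A's outer while-loop over y.
def outerA (m : Nat) (l : Int) (y : Nat) (T : Int) : Int :=
  if _hy : y = 0 then T
  else outerA m l (y &&& (y - 1)) (innerA (y &&& (y - 1)) y l m T)
  termination_by y
  decreasing_by exact Nat.lt_of_le_of_lt Nat.and_le_right (by omega)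

-- On Pre_ (y ≥ 0, and m ≥ 0 whenever y > 0) both loop variables are nonnegative,
-- so the Nat state via toNat is exact; outside Pre_ Python A diverges or raises.
def elder_age (m : Int) (y : Int) (l : Int) (t : Int) : Int :=
  PySem.Int.mod (outerA m.toNat l y.toNat 0) t

-- ===== PORT B =====
-- Source B's _series: sum over v in [0,p) of max(v - off, 0), closed form
def scfB (p : Nat) (off : Int) : Int :=
  let c : Int := min (max off 0) (p : Int)
  PySem.Int.floordiv (((p : Int) - c) * ((p : Int) - 1 + c - 2 * off)) 2

-- Source B's _f: sum over i<M, j<N of max((i^j) - off, 0) by splitting at p = 2^log2(M)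
def fB (M N : Nat) (off : Int) : Int :=
  if M = 0 ∨ N = 0 then 0
  else if M < N then fB N M off
  else
    let p := 2 ^ Nat.log2 M
    if N ≤ p then (N : Int) * scfB p off + fB (M - p) N (off - (p : Int))
    else (p : Int) * scfB p off + (((M : Int) - (p : Int)) + ((N : Int) - (p : Int))) * scfB p (off - (p : Int))
           + fB (M - p) (N - p) off
  termination_by (M + N, N)
  decreasing_by
  · exact Prod.Lex.right' _ (by omega) (by omega)
  · have := Nat.two_pow_pos (Nat.log2 M); exact Prod.Lex.left _ _ (by omega)
  · have := Nat.two_pow_pos (Nat.log2 M); exact Prod.Lex.left _ _ (by omega)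

def elder_age_alt (m : Int) (y : Int) (l : Int) (t : Int) : Int :=
  PySem.Int.mod (fB m.toNat y.toNat l) t

-- ===== PRECONDITION & SPEC =====
-- Pre_ excludes t = 0 (Python A raises ZeroDivisionError) and negative y (and
-- negative m when y > 0), on which A's bit-stripping loops never terminate.
def Pre_elder_age (m : Int) (y : Int) (l : Int) (t : Int) : Prop :=
  0 ≤ y ∧ (y = 0 ∨ 0 ≤ m) ∧ t ≠ 0
instance (m : Int) (y : Int) (l : Int) (t : Int) : Decidable (Pre_elder_age m y l t) := by
  unfold Pre_elder_age; infer_instance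

def pvWitness_elder_age : Int × Int × Int × Int := (8, 5, 1, 100)

def Spec_elder_age (m : Int) (y : Int) (l : Int) (t : Int) (out : Int) : Prop := out = elder_age_alt m y l t
instance (m : Int) (y : Int) (l : Int) (t : Int) (out : Int) : Decidable (Spec_elder_age m y l t out) := by unfold Spec_elder_age; infer_instance

-- ===== CLAIM (what is proved, stated in full; the proofs are below) =====
def Claim_equal_elder_age : Prop := ∀ (m : Int) (y : Int) (l : Int) (t : Int), Dom_elder_age m y l t → Pre_elder_age m y l t → Spec_elder_age m y l t (elder_age m y l t)

-- ===== LEMMAS AND PROOFS =====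

-- the specification both programs compute: Σ_{v<p} max(v - off, 0) and the grid sum
def Ssum (p : Nat) (off : Int) : Int := ∑ v ∈ Finset.range p, max ((v : Int) - off) 0

def Gs (M N : Nat) (l : Int) : Int :=
  ∑ i ∈ Finset.range M, ∑ j ∈ Finset.range N, max (((i ^^^ j : Nat) : Int) - l) 0

theorem twoSsum (p : Nat) (off : Int) :
    ((p : Int) - min (max off 0) (p : Int)) * ((p : Int) - 1 + min (max off 0) (p : Int) - 2 * off)
      = 2 * Ssum p off := by
  induction p with
  | zero => simp [Ssum]
  | succ p ih =>
    rw [Ssum, Finset.sum_range_succ, ← Ssum]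
    push_cast
    by_cases h1 : off ≤ (p : Int)
    · have e1 : min (max off 0) ((p:Int) + 1) = max off 0 := by omega
      have e2 : min (max off 0) ((p:Int)) = max off 0 := by omega
      have e3 : max ((p:Int) - off) 0 = (p:Int) - off := by omega
      rw [e1, e3]; rw [e2] at ih
      linear_combination ih
    · have e1 : min (max off 0) ((p:Int) + 1) = (p:Int) + 1 := by omega
      have e2 : min (max off 0) ((p:Int)) = (p:Int) := by omega
      have e3 : max ((p:Int) - off) 0 = 0 := by omega
      rw [e1, e3]; rw [e2] at ih
      linear_combination ih

theorem scfB_eq (p : Nat) (off : Int) : scfB p off = Ssum p off := by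
  show PySem.Int.floordiv (((p : Int) - min (max off 0) (p : Int)) * ((p : Int) - 1 + min (max off 0) (p : Int) - 2 * off)) 2 = Ssum p off
  rw [twoSsum p off, PySem.Int.floordiv_eq_ediv_of_pos (by norm_num), Int.mul_ediv_cancel_left _ (by norm_num)]

theorem sum_xor_range (k c : Nat) (hc : c < 2 ^ k) (F : Nat → Int) :
    ∑ w ∈ Finset.range (2 ^ k), F (c ^^^ w) = ∑ w ∈ Finset.range (2 ^ k), F w := by
  apply Finset.sum_nbij' (i := fun w => c ^^^ w) (j := fun w => c ^^^ w)
  · intro a ha; exact Finset.mem_range.2 (Nat.xor_lt_two_pow hc (Finset.mem_range.1 ha))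
  · intro a ha; exact Finset.mem_range.2 (Nat.xor_lt_two_pow hc (Finset.mem_range.1 ha))
  · intro a _; exact Nat.xor_xor_cancel_left c a
  · intro a _; exact Nat.xor_xor_cancel_left c a
  · intro a _; rfl

theorem align_add_xor (k q v : Nat) (hv : v < 2 ^ k) : 2 ^ k * q + v = (2 ^ k * q) ^^^ v := by
  apply Nat.eq_of_testBit_eq; intro j
  have h0 : (2 ^ k * q).testBit j = if j < k then false else q.testBit (j - k) := by
    simpa using Nat.testBit_two_pow_mul_add q (i := k) (b := 0) (Nat.two_pow_pos k) j
  rw [Nat.testBit_xor, Nat.testBit_two_pow_mul_add q hv, h0]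
  by_cases hj : j < k
  · simp [hj]
  · have : v < 2 ^ j := lt_of_lt_of_le hv (Nat.pow_le_pow_right (by norm_num) (by omega))
    simp [hj, Nat.testBit_lt_two_pow this]

theorem highbit_xor (k i j : Nat) (hi : i < 2 ^ k) (hj : j < 2 ^ k) :
    (2 ^ k + i) ^^^ j = 2 ^ k + (i ^^^ j) := by
  have h1 : 2 ^ k + i = 2 ^ k * 1 ^^^ i := by
    rw [← align_add_xor k 1 i hi]; ring
  have h2 : 2 ^ k + (i ^^^ j) = 2 ^ k * 1 ^^^ (i ^^^ j) := by
    rw [← align_add_xor k 1 _ (Nat.xor_lt_two_pow hi hj)]; ring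
  rw [h1, h2, Nat.xor_assoc]

theorem highbit_cancel (k i j : Nat) (hi : i < 2 ^ k) (hj : j < 2 ^ k) :
    (2 ^ k + i) ^^^ (2 ^ k + j) = i ^^^ j := by
  have h1 : 2 ^ k + i = 2 ^ k * 1 ^^^ i := by rw [← align_add_xor k 1 i hi]; ring
  have h2 : 2 ^ k + j = 2 ^ k * 1 ^^^ j := by rw [← align_add_xor k 1 j hj]; ring
  rw [h1, h2]
  calc (2^k*1 ^^^ i) ^^^ (2^k*1 ^^^ j) = (2^k*1 ^^^ 2^k*1) ^^^ (i ^^^ j) := by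
        rw [Nat.xor_assoc, Nat.xor_assoc]; congr 1
        rw [← Nat.xor_assoc, ← Nat.xor_assoc, Nat.xor_comm i]
    _ = i ^^^ j := by rw [Nat.xor_self, Nat.zero_xor]

theorem strip_eq (a q : Nat) :
    (2 ^ (a + 1) * q + 2 ^ a) &&& (2 ^ (a + 1) * q + 2 ^ a - 1) = 2 ^ (a + 1) * q := by
  have hpos := Nat.two_pow_pos a
  have hlt : (2:Nat) ^ a < 2 ^ (a + 1) := by rw [pow_succ]; omega
  have h1 : 2 ^ (a + 1) * q + 2 ^ a - 1 = 2 ^ (a + 1) * q + (2 ^ a - 1) := by omega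
  rw [h1]
  apply Nat.eq_of_testBit_eq; intro j
  have h0 : (2 ^ (a+1) * q).testBit j = if j < a+1 then false else q.testBit (j - (a+1)) := by
    simpa using Nat.testBit_two_pow_mul_add q (i := a+1) (b := 0) (Nat.two_pow_pos (a+1)) j
  rw [Nat.testBit_and, Nat.testBit_two_pow_mul_add q hlt, Nat.testBit_two_pow_mul_add q (by omega), h0]
  by_cases hj : j < a + 1
  · simp only [hj, if_pos, Nat.testBit_two_pow, Nat.testBit_two_pow_sub_one]
    by_cases h : a = j <;> simp [h]
  · simp [hj]

theorem exists_form (y : Nat) (hy : y ≠ 0) : ∃ a q, y = 2 ^ (a + 1) * q + 2 ^ a := by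
  obtain ⟨k, m, hodd, rfl⟩ := Nat.exists_eq_two_pow_mul_odd hy
  obtain ⟨q, hq⟩ := hodd
  exact ⟨k, q, by rw [hq]; ring⟩

theorem or_mask (z b : Nat) : z ||| (2 ^ b - 1) = 2 ^ b * (z / 2 ^ b) + (2 ^ b - 1) := by
  apply Nat.eq_of_testBit_eq; intro j
  rw [Nat.testBit_or, Nat.testBit_two_pow_mul_add _ (by have := Nat.two_pow_pos b; omega)]
  by_cases hj : j < b
  · simp [hj, Nat.testBit_two_pow_sub_one]
  · have hz : z.testBit j = (z / 2^b).testBit (j - b) := by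
      conv_lhs => rw [← Nat.div_add_mod z (2^b)]
      rw [Nat.testBit_two_pow_mul_add _ (Nat.mod_lt _ (Nat.two_pow_pos b))]
      simp [hj]
    simp [hj, Nat.testBit_two_pow_sub_one, hz]

-- the core block sum: a 2^b × 2^a aligned block is 2^a copies of a run of 2^b consecutive values
theorem block_core (b a qx qy : Nat) (hab : a ≤ b) (l : Int) :
    ∑ i ∈ Finset.range (2 ^ b), ∑ j ∈ Finset.range (2 ^ a),
        max ((((2 ^ (b + 1) * qx + i) ^^^ (2 ^ (a + 1) * qy + j) : Nat) : Int) - l) 0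
      = ((2 ^ a : Nat) : Int) * Ssum (2 ^ b)
          (l - ((2 ^ b * (((2 ^ (b + 1) * qx) ^^^ (2 ^ (a + 1) * qy)) / 2 ^ b) : Nat) : Int)) := by
  have hpa : (2:Nat)^a ≤ 2^b := Nat.pow_le_pow_right (by norm_num) hab
  set x' := 2 ^ (b + 1) * qx with hx'
  set y' := 2 ^ (a + 1) * qy with hy'
  set z := x' ^^^ y' with hz
  set zh := 2 ^ b * (z / 2 ^ b) with hzh
  have step1 : ∀ i ∈ Finset.range (2^b), ∀ j ∈ Finset.range (2^a),
      (x' + i) ^^^ (y' + j) = z ^^^ (i ^^^ j) := by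
    intro i hi j hj
    have hib : i < 2^(b+1) := lt_of_lt_of_le (Finset.mem_range.1 hi) (Nat.pow_le_pow_right (by norm_num) (by omega))
    have hja : j < 2^(a+1) := lt_of_lt_of_le (Finset.mem_range.1 hj) (Nat.pow_le_pow_right (by norm_num) (by omega))
    rw [align_add_xor (b+1) qx i hib, align_add_xor (a+1) qy j hja, ← hx', ← hy']
    rw [Nat.xor_assoc, Nat.xor_assoc]; congr 1
    rw [← Nat.xor_assoc, ← Nat.xor_assoc, Nat.xor_comm i]
  rw [Finset.sum_congr rfl (fun i hi => Finset.sum_congr rfl (fun j hj => by rw [step1 i hi j hj]))]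
  rw [Finset.sum_comm]
  have step2 : ∀ j ∈ Finset.range (2^a),
      ∑ i ∈ Finset.range (2^b), max (((z ^^^ (i ^^^ j) : Nat) : Int) - l) 0
        = ∑ w ∈ Finset.range (2^b), max (((z ^^^ w : Nat) : Int) - l) 0 := by
    intro j hj
    have hjb : j < 2^b := lt_of_lt_of_le (Finset.mem_range.1 hj) hpa
    have := sum_xor_range b j hjb (fun w => max (((z ^^^ w : Nat) : Int) - l) 0)
    calc ∑ i ∈ Finset.range (2^b), max (((z ^^^ (i ^^^ j) : Nat) : Int) - l) 0
        = ∑ i ∈ Finset.range (2^b), max (((z ^^^ (j ^^^ i) : Nat) : Int) - l) 0 := by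
          refine Finset.sum_congr rfl (fun i _ => by rw [Nat.xor_comm i j])
      _ = _ := this
  rw [Finset.sum_congr rfl step2]
  rw [Finset.sum_const, Finset.card_range, nsmul_eq_mul]
  push_cast
  congr 1
  have hzl : z % 2^b < 2^b := Nat.mod_lt _ (Nat.two_pow_pos b)
  have hzsplit : z = zh ^^^ (z % 2^b) := by
    rw [hzh, ← align_add_xor b _ _ hzl, Nat.div_add_mod]
  have step3 : ∀ w ∈ Finset.range (2^b), z ^^^ w = zh ^^^ ((z % 2^b) ^^^ w) := by
    intro w _
    conv_lhs => rw [hzsplit]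
    rw [Nat.xor_assoc]
  rw [Finset.sum_congr rfl (fun w hw => by rw [step3 w hw])]
  rw [sum_xor_range b (z % 2^b) hzl (fun w => max (((zh ^^^ w : Nat) : Int) - l) 0)]
  have step4 : ∀ w ∈ Finset.range (2^b), zh ^^^ w = zh + w := by
    intro w hw
    rw [hzh, ← align_add_xor b _ _ (Finset.mem_range.1 hw)]
  rw [Finset.sum_congr rfl (fun w hw => by rw [step4 w hw])]
  unfold Ssum
  refine Finset.sum_congr rfl (fun w _ => ?_)
  push_cast
  congr 1
  ring

theorem blockterm (P w h c off' : Int) (hP : 0 < P) (hh : h = max (P - off') 0)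
    (hw : w = min h P) (hc : c = min (max off' 0) P) :
    w * (h + h - w - 1) = (P - c) * (P - 1 + c - 2 * off') := by
  by_cases h1 : off' ≥ P
  · have e1 : h = 0 := by omega
    have e2 : w = 0 := by omega
    have e3 : c = P := by omega
    rw [e1, e2, e3]; ring
  · by_cases h2 : 0 ≤ off'
    · have e1 : h = P - off' := by omega
      have e2 : w = P - off' := by omega
      have e3 : c = off' := by omega
      rw [e1, e2, e3]; ring
    · have e1 : h = P - off' := by omega
      have e2 : w = P := by omega
      have e3 : c = 0 := by omega
      rw [e1, e2, e3]; ring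

-- A's per-block closed-form term equals 2^A copies of a run sum (orientation A ≤ B)
theorem term_eq (B A : Nat) (hBA : A ≤ B) (z : Nat) (l : Int) :
    PySem.Int.floordiv
        ((min ((2^B : Nat) : Int) ((2^A : Nat) : Int)) *
          (min (max (PySem.Int.bor ((z : Nat) : Int) ((max ((2^B : Nat) : Int) ((2^A : Nat) : Int)) - 1) + 1 - l) 0)
               (max ((2^B : Nat) : Int) ((2^A : Nat) : Int))) *
          ((max (PySem.Int.bor ((z : Nat) : Int) ((max ((2^B : Nat) : Int) ((2^A : Nat) : Int)) - 1) + 1 - l) 0)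
            + (max (PySem.Int.bor ((z : Nat) : Int) ((max ((2^B : Nat) : Int) ((2^A : Nat) : Int)) - 1) + 1 - l) 0)
            - (min (max (PySem.Int.bor ((z : Nat) : Int) ((max ((2^B : Nat) : Int) ((2^A : Nat) : Int)) - 1) + 1 - l) 0)
                   (max ((2^B : Nat) : Int) ((2^A : Nat) : Int))) - 1)) 2
      = ((2^A : Nat) : Int) * Ssum (2^B) (l - ((2 ^ B * (z / 2 ^ B) : Nat) : Int)) := by
  have hle : ((2^A : Nat) : Int) ≤ ((2^B : Nat) : Int) := by
    exact_mod_cast Nat.pow_le_pow_right (by norm_num) hBA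
  have hposB := Nat.two_pow_pos B
  have hposA := Nat.two_pow_pos A
  have hmin : min ((2^B : Nat) : Int) ((2^A : Nat) : Int) = ((2^A : Nat) : Int) := by omega
  have hmax : max ((2^B : Nat) : Int) ((2^A : Nat) : Int) = ((2^B : Nat) : Int) := by omega
  rw [hmin, hmax]
  have hm1 : ((2^B : Nat) : Int) - 1 = (((2^B - 1 : Nat)) : Int) := by push_cast [hposB]; ring
  rw [hm1, PySem.Int.bor_natCast, or_mask z B]
  set zh := 2 ^ B * (z / 2 ^ B) with hzh
  set off' := l - (zh : Int) with hoff
  have hbcast : ((zh + (2^B - 1) : Nat) : Int) + 1 - l = ((2^B : Nat) : Int) - off' := by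
    push_cast [hposB]; omega
  rw [hbcast]
  set P := ((2^B : Nat) : Int) with hP
  set h := max (P - off') 0 with hh
  set w := min h P with hw
  have key : w * (h + h - w - 1) = (P - min (max off' 0) P) * (P - 1 + min (max off' 0) P - 2 * off') :=
    blockterm P w h (min (max off' 0) P) off' (by positivity) hh hw rfl
  have key2 : w * (h + h - w - 1) = 2 * Ssum (2^B) off' := by rw [key]; exact twoSsum (2^B) off'
  have assoc : ((2^A : Nat) : Int) * w * (h + h - w - 1) = 2 * (((2^A : Nat) : Int) * Ssum (2^B) off') := by
    calc ((2^A : Nat) : Int) * w * (h + h - w - 1) = ((2^A : Nat) : Int) * (w * (h + h - w - 1)) := by ring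
      _ = ((2^A : Nat) : Int) * (2 * Ssum (2^B) off') := by rw [key2]
      _ = 2 * (((2^A : Nat) : Int) * Ssum (2^B) off') := by ring
  rw [assoc, PySem.Int.floordiv_eq_ediv_of_pos (by norm_num), Int.mul_ediv_cancel_left _ (by norm_num)]

-- A's block term equals the block's grid sum (both orientations)
theorem block_sum (b a qx qy : Nat) (l : Int) :
    PySem.Int.floordiv
        ((min ((2^b : Nat) : Int) ((2^a : Nat) : Int)) *
          (min (max (PySem.Int.bor (((2 ^ (b + 1) * qx) ^^^ (2 ^ (a + 1) * qy) : Nat) : Int) ((max ((2^b : Nat) : Int) ((2^a : Nat) : Int)) - 1) + 1 - l) 0)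
               (max ((2^b : Nat) : Int) ((2^a : Nat) : Int))) *
          ((max (PySem.Int.bor (((2 ^ (b + 1) * qx) ^^^ (2 ^ (a + 1) * qy) : Nat) : Int) ((max ((2^b : Nat) : Int) ((2^a : Nat) : Int)) - 1) + 1 - l) 0)
            + (max (PySem.Int.bor (((2 ^ (b + 1) * qx) ^^^ (2 ^ (a + 1) * qy) : Nat) : Int) ((max ((2^b : Nat) : Int) ((2^a : Nat) : Int)) - 1) + 1 - l) 0)
            - (min (max (PySem.Int.bor (((2 ^ (b + 1) * qx) ^^^ (2 ^ (a + 1) * qy) : Nat) : Int) ((max ((2^b : Nat) : Int) ((2^a : Nat) : Int)) - 1) + 1 - l) 0)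
                   (max ((2^b : Nat) : Int) ((2^a : Nat) : Int))) - 1)) 2
      = ∑ i ∈ Finset.range (2 ^ b), ∑ j ∈ Finset.range (2 ^ a),
          max ((((2 ^ (b + 1) * qx + i) ^^^ (2 ^ (a + 1) * qy + j) : Nat) : Int) - l) 0 := by
  set z := (2 ^ (b + 1) * qx) ^^^ (2 ^ (a + 1) * qy) with hz
  by_cases hab : a ≤ b
  · rw [term_eq b a hab z l, block_core b a qx qy hab l]
  · have hba : b ≤ a := by omega
    rw [min_comm ((2^b : Nat) : Int) ((2^a : Nat) : Int), max_comm ((2^b : Nat) : Int) ((2^a : Nat) : Int), term_eq a b hba z l]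
    rw [Finset.sum_comm]
    have : ∀ j ∈ Finset.range (2^a), ∀ i ∈ Finset.range (2^b),
        (2 ^ (b + 1) * qx + i) ^^^ (2 ^ (a + 1) * qy + j)
          = (2 ^ (a + 1) * qy + j) ^^^ (2 ^ (b + 1) * qx + i) := by
      intro j _ i _; exact Nat.xor_comm _ _
    rw [Finset.sum_congr rfl (fun j hj => Finset.sum_congr rfl (fun i hi => by rw [this j hj i hi]))]
    rw [block_core a b qy qx hba l]
    rw [show (2 ^ (a + 1) * qy) ^^^ (2 ^ (b + 1) * qx) = z from Nat.xor_comm _ _]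

theorem inner_eq (a qy : Nat) (l : Int) (x : Nat) (T : Int) :
    innerA (2 ^ (a + 1) * qy) (2 ^ (a + 1) * qy + 2 ^ a) l x T
      = T + ∑ i ∈ Finset.range x, ∑ j ∈ Finset.range (2 ^ a),
          max (((i ^^^ (2 ^ (a + 1) * qy + j) : Nat) : Int) - l) 0 := by
  induction x using Nat.strong_induction_on generalizing T with
  | _ x ih =>
    by_cases hx : x = 0
    · subst hx; rw [innerA]; simp
    · obtain ⟨b, qx, hxf⟩ := exists_form x hx
      have hposb := Nat.two_pow_pos b
      rw [innerA]
      simp only [dif_neg hx]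
      have hstrip : x &&& (x - 1) = 2^(b+1)*qx := by rw [hxf]; exact strip_eq b qx
      rw [hstrip]
      rw [ih (2^(b+1)*qx) (by omega) _]
      have e1 : ((x : Nat) : Int) - ((2^(b+1)*qx : Nat) : Int) = ((2^b : Nat) : Int) := by
        rw [hxf]; push_cast; ring
      have e2 : ((2^(a+1)*qy + 2^a : Nat) : Int) - ((2^(a+1)*qy : Nat) : Int) = ((2^a : Nat) : Int) := by
        push_cast; ring
      rw [e1, e2]
      conv_rhs => rw [hxf, Finset.sum_range_add]
      rw [block_sum b a qx qy l]
      ring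

theorem outer_eq (m : Nat) (l : Int) (y : Nat) (T : Int) :
    outerA m l y T = T + ∑ j ∈ Finset.range y, ∑ i ∈ Finset.range m,
        max (((i ^^^ j : Nat) : Int) - l) 0 := by
  induction y using Nat.strong_induction_on generalizing T with
  | _ y ih =>
    by_cases hy : y = 0
    · subst hy; rw [outerA]; simp
    · obtain ⟨a, qy, hyf⟩ := exists_form y hy
      have hposa := Nat.two_pow_pos a
      rw [outerA]
      simp only [dif_neg hy]
      have hstrip : y &&& (y - 1) = 2^(a+1)*qy := by rw [hyf]; exact strip_eq a qy
      rw [hstrip]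
      conv_lhs => rw [hyf]
      rw [inner_eq a qy l m T]
      rw [ih (2^(a+1)*qy) (by omega) _]
      conv_rhs => rw [hyf, Finset.sum_range_add]
      rw [Finset.sum_comm]
      ring

theorem gs_comm (M N : Nat) (l : Int) : Gs M N l = Gs N M l := by
  unfold Gs
  rw [Finset.sum_comm]
  exact Finset.sum_congr rfl (fun j _ => Finset.sum_congr rfl (fun i _ => by rw [Nat.xor_comm]))

theorem row_sum (k N : Nat) (hN : N ≤ 2^k) (off : Int) :
    ∑ i ∈ Finset.range (2^k), ∑ j ∈ Finset.range N, max (((i ^^^ j : Nat) : Int) - off) 0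
      = (N : Int) * Ssum (2^k) off := by
  rw [Finset.sum_comm]
  have step : ∀ j ∈ Finset.range N,
      ∑ i ∈ Finset.range (2^k), max (((i ^^^ j : Nat) : Int) - off) 0 = Ssum (2^k) off := by
    intro j hj
    have hjk : j < 2^k := lt_of_lt_of_le (Finset.mem_range.1 hj) hN
    calc ∑ i ∈ Finset.range (2^k), max (((i ^^^ j : Nat) : Int) - off) 0
        = ∑ i ∈ Finset.range (2^k), max (((j ^^^ i : Nat) : Int) - off) 0 :=
          Finset.sum_congr rfl (fun i _ => by rw [Nat.xor_comm])
      _ = Ssum (2^k) off := sum_xor_range k j hjk (fun w => max ((w : Int) - off) 0)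
  rw [Finset.sum_congr rfl step, Finset.sum_const, Finset.card_range, nsmul_eq_mul]

theorem col_sum (k Q : Nat) (hQ : Q ≤ 2^k) (off : Int) :
    ∑ i ∈ Finset.range Q, ∑ j ∈ Finset.range (2^k), max (((i ^^^ j : Nat) : Int) - off) 0
      = (Q : Int) * Ssum (2^k) off := by
  have step : ∀ i ∈ Finset.range Q,
      ∑ j ∈ Finset.range (2^k), max (((i ^^^ j : Nat) : Int) - off) 0 = Ssum (2^k) off := by
    intro i hi
    have hik : i < 2^k := lt_of_lt_of_le (Finset.mem_range.1 hi) hQ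
    exact sum_xor_range k i hik (fun w => max ((w : Int) - off) 0)
  rw [Finset.sum_congr rfl step, Finset.sum_const, Finset.card_range, nsmul_eq_mul]

theorem shift_term (k i j : Nat) (hi : i < 2^k) (hj : j < 2^k) (off : Int) :
    max ((((2^k + i) ^^^ j : Nat) : Int) - off) 0
      = max (((i ^^^ j : Nat) : Int) - (off - ((2^k : Nat) : Int))) 0 := by
  rw [highbit_xor k i j hi hj]
  congr 1
  push_cast
  ring

theorem fB_eq (M N : Nat) (off : Int) : fB M N off = Gs M N off := by
  fun_induction fB
  case _ M N off h =>
    unfold Gs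
    rcases h with h | h <;> subst h <;> simp
  case _ M N off h hlt ih =>
    rw [ih, gs_comm]
  case _ M N off h hlt p hNp ih =>
    rw [show p = 2 ^ Nat.log2 M from rfl] at hNp ih ⊢
    have hM : M ≠ 0 := fun hM0 => h (Or.inl hM0)
    have hpM : 2 ^ Nat.log2 M ≤ M := Nat.log2_self_le hM
    have hM2p : M < 2 ^ (Nat.log2 M + 1) := Nat.lt_log2_self
    have hpos := Nat.two_pow_pos (Nat.log2 M)
    set k := Nat.log2 M with hk
    rw [ih, scfB_eq]
    have hsplit : M = 2^k + (M - 2^k) := by omega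
    conv_rhs => rw [Gs, hsplit, Finset.sum_range_add]
    have part2 : ∀ i ∈ Finset.range (M - 2^k),
        ∑ j ∈ Finset.range N, max ((((2^k + i) ^^^ j : Nat) : Int) - off) 0
          = ∑ j ∈ Finset.range N, max (((i ^^^ j : Nat) : Int) - (off - ((2^k : Nat) : Int))) 0 := by
      intro i hi
      have hik : i < 2^k := by have := Finset.mem_range.1 hi; rw [pow_succ] at hM2p; omega
      refine Finset.sum_congr rfl (fun j hj => ?_)
      exact shift_term k i j hik (lt_of_lt_of_le (Finset.mem_range.1 hj) hNp) off
    rw [Finset.sum_congr rfl part2, row_sum k N hNp off]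
    unfold Gs
    ring
  case _ M N off h hlt p hNp ih =>
    rw [show p = 2 ^ Nat.log2 M from rfl] at hNp ih ⊢
    have hM : M ≠ 0 := fun hM0 => h (Or.inl hM0)
    have hpM : 2 ^ Nat.log2 M ≤ M := Nat.log2_self_le hM
    have hM2p : M < 2 ^ (Nat.log2 M + 1) := Nat.lt_log2_self
    have hpos := Nat.two_pow_pos (Nat.log2 M)
    have hNM : N ≤ M := Nat.le_of_not_lt hlt
    set k := Nat.log2 M with hk
    have hMk : M - 2^k < 2^k := by rw [pow_succ] at hM2p; omega
    have hNk : N - 2^k < 2^k := by omega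
    have hNpk : 2^k < N := Nat.lt_of_not_le hNp
    rw [ih, scfB_eq, scfB_eq]
    have hsplitM : M = 2^k + (M - 2^k) := by omega
    have hsplitN : N = 2^k + (N - 2^k) := by omega
    conv_rhs => rw [Gs, hsplitM, Finset.sum_range_add]
    have inner_split : ∀ i : Nat,
        ∑ j ∈ Finset.range N, max (((i ^^^ j : Nat) : Int) - off) 0
          = ∑ j ∈ Finset.range (2^k), max (((i ^^^ j : Nat) : Int) - off) 0
            + ∑ j ∈ Finset.range (N - 2^k), max (((i ^^^ (2^k + j) : Nat) : Int) - off) 0 := by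
      intro i
      conv_lhs => rw [hsplitN, Finset.sum_range_add]
    -- the i < 2^k half
    have p1 : ∑ i ∈ Finset.range (2^k),
        ∑ j ∈ Finset.range N, max (((i ^^^ j : Nat) : Int) - off) 0
          = ((2^k : Nat) : Int) * Ssum (2^k) off
            + ((N - 2^k : Nat) : Int) * Ssum (2^k) (off - ((2^k : Nat) : Int)) := by
      rw [Finset.sum_congr rfl (fun i _ => inner_split i), Finset.sum_add_distrib]
      congr 1
      · exact row_sum k (2^k) le_rfl off
      · rw [Finset.sum_comm]
        have e : ∀ j ∈ Finset.range (N - 2^k), ∀ i ∈ Finset.range (2^k),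
            max (((i ^^^ (2^k + j) : Nat) : Int) - off) 0
              = max (((j ^^^ i : Nat) : Int) - (off - ((2^k : Nat) : Int))) 0 := by
          intro j hj i hi
          rw [Nat.xor_comm i (2^k + j)]
          exact shift_term k j i (lt_of_lt_of_le (Finset.mem_range.1 hj) (le_of_lt hNk)) (Finset.mem_range.1 hi) off
        rw [Finset.sum_congr rfl (fun j hj => Finset.sum_congr rfl (fun i hi => e j hj i hi))]
        exact col_sum k (N - 2^k) (le_of_lt hNk) (off - ((2^k : Nat) : Int))
    -- the i ≥ 2^k half
    have p2 : ∑ i ∈ Finset.range (M - 2^k),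
        ∑ j ∈ Finset.range N, max ((((2^k + i) ^^^ j : Nat) : Int) - off) 0
          = ((M - 2^k : Nat) : Int) * Ssum (2^k) (off - ((2^k : Nat) : Int))
            + Gs (M - 2^k) (N - 2^k) off := by
      rw [Finset.sum_congr rfl (fun i _ => inner_split (2^k + i)), Finset.sum_add_distrib]
      congr 1
      · have e : ∀ i ∈ Finset.range (M - 2^k), ∀ j ∈ Finset.range (2^k),
            max ((((2^k + i) ^^^ j : Nat) : Int) - off) 0
              = max (((i ^^^ j : Nat) : Int) - (off - ((2^k : Nat) : Int))) 0 := by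
          intro i hi j hj
          exact shift_term k i j (lt_of_lt_of_le (Finset.mem_range.1 hi) (le_of_lt hMk)) (Finset.mem_range.1 hj) off
        rw [Finset.sum_congr rfl (fun i hi => Finset.sum_congr rfl (fun j hj => e i hi j hj))]
        exact col_sum k (M - 2^k) (le_of_lt hMk) (off - ((2^k : Nat) : Int))
      · have e : ∀ i ∈ Finset.range (M - 2^k), ∀ j ∈ Finset.range (N - 2^k),
            max ((((2^k + i) ^^^ (2^k + j) : Nat) : Int) - off) 0
              = max (((i ^^^ j : Nat) : Int) - off) 0 := by
          intro i hi j hj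
          rw [highbit_cancel k i j (lt_of_lt_of_le (Finset.mem_range.1 hi) (le_of_lt hMk))
            (lt_of_lt_of_le (Finset.mem_range.1 hj) (le_of_lt hNk))]
        rw [Finset.sum_congr rfl (fun i hi => Finset.sum_congr rfl (fun j hj => e i hi j hj))]
        rfl
    rw [p1, p2]
    have c1 : (M : Int) - ((2^k : Nat) : Int) = ((M - 2^k : Nat) : Int) := by
      push_cast [hpM]; ring
    have c2 : (N : Int) - ((2^k : Nat) : Int) = ((N - 2^k : Nat) : Int) := by
      push_cast [le_of_lt hNpk]; ring
    rw [c1, c2]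
    ring

-- ===== VERDICT (by name: the statement is the Claim_ definition above) =====
theorem elder_age_spec : Claim_equal_elder_age := by
  intro m y l t _ _
  unfold Spec_elder_age elder_age elder_age_alt
  rw [outer_eq, fB_eq]
  unfold Gs
  rw [Finset.sum_comm]
  simp
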